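-- pv_equiv track=rewrite | github.com/chocolatethunder/Connect4 | connect4.py | findMaxCol
-- ===== SOURCE A (Python) =====
-- def findMaxCol(rating):
--
-- 	max = 0
-- 	maxCol = None
--
-- 	for col in range(len(rating)):
-- 		for row in range(len(rating[col])):
-- 			if (max < rating[col][row]):
-- 				max = rating[col][row]
-- 				maxCol = col
--
-- 	return maxCol
-- ===== SOURCE B (Python) =====
-- def findMaxCol(rating):
--     colMaxes = [max(col, default=0) for col in rating]
--     best = max(colMaxes, default=0)
--     if best <= 0:
--         return None
--     return colMaxes.index(best)
-- ===== Notes on version B (the rewrite author's own statement) =====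
-- stated objective: alternative
-- what changed: Replaces the interleaved element-by-element running (max, maxCol) scan with a build-per-column-maxima-table, take-overall-max, then first-index (argmax) lookup.
import Mathlib
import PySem

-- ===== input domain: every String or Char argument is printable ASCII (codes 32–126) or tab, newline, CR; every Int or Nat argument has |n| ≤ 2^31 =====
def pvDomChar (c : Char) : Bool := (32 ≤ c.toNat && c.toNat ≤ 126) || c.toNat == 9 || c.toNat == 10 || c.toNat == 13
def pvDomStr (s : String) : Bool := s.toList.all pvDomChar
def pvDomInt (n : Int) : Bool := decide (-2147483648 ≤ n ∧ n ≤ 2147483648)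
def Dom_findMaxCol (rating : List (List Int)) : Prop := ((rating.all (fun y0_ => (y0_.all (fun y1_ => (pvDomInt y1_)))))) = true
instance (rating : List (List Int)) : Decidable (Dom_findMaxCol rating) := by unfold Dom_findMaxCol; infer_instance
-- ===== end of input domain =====

-- B replaces A's interleaved running (max, maxCol) element scan by a per-column-maxima
-- table followed by an overall max and a first-index lookup (alternative decomposition).

-- ===== PORT A =====
def findMaxCol (rating : List (List Int)) : Option Int :=
  -- for col in range(len(rating)): for row in range(len(rating[col])): …
  -- indices produced by range(len(..)) are always in range, so pyGetD's default is never used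
  let st :=
    (PySem.List.pyRange 0 (rating.length : Int) 1).foldl
      (fun (st : Int × Option Int) col =>
        let c := PySem.List.pyGetD rating col []
        (PySem.List.pyRange 0 (c.length : Int) 1).foldl
          (fun (st : Int × Option Int) row =>
            let v := PySem.List.pyGetD c row 0
            if st.1 < v then (v, some col) else st)
          st)
      ((0 : Int), (none : Option Int))
  st.2

-- ===== PORT B =====
def findMaxCol_alt (rating : List (List Int)) : Option Int :=
  let colMaxes := rating.map (fun col => (PySem.List.max? col (fun y => y)).getD 0)
  let best := (PySem.List.max? colMaxes (fun y => y)).getD 0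
  if best ≤ 0 then none
  else Option.map (fun k : Nat => (k : Int)) (PySem.List.index? colMaxes best)  -- best ∈ colMaxes, so .index never raises

-- ===== PRECONDITION & SPEC =====
def Spec_findMaxCol (rating : List (List Int)) (out : Option Int) : Prop := out = findMaxCol_alt rating
instance (rating : List (List Int)) (out : Option Int) : Decidable (Spec_findMaxCol rating out) := by unfold Spec_findMaxCol; infer_instance

-- ===== CLAIM (what is proved, stated in full; the proofs are below) =====
def Claim_equal_findMaxCol : Prop := ∀ (rating : List (List Int)), Dom_findMaxCol rating → Spec_findMaxCol rating (findMaxCol rating)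

-- ===== LEMMAS AND PROOFS =====

-- max(col, default=0) of one column
def pvColMax (c : List Int) : Int := (PySem.List.max? c (fun y => y)).getD 0

theorem pvColMax_cons (x : Int) (t : List Int) : pvColMax (x :: t) = t.foldl max x := by
  simp [pvColMax, PySem.List.max?_id_cons]

theorem foldl_max_comm (t : List Int) : ∀ m x : Int, t.foldl max (max m x) = max m (t.foldl max x) := by
  induction t with
  | nil => intro m x; rfl
  | cons v t ih =>
      intro m x
      show t.foldl max (max (max m x) v) = max m (t.foldl max (max x v))
      rw [max_assoc, ih]

theorem foldl_maxP_comm (t : List (List Int)) :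
    ∀ m x : Int, t.foldl (fun a c => max a (pvColMax c)) (max m x)
      = max m (t.foldl (fun a c => max a (pvColMax c)) x) := by
  induction t with
  | nil => intro m x; rfl
  | cons v t ih =>
      intro m x
      show t.foldl _ (max (max m x) (pvColMax v)) = max m (t.foldl _ (max x (pvColMax v)))
      rw [max_assoc, ih]

-- running max over a column, started at m ≥ 0, is max m (pvColMax c)
theorem foldl_max_colMax (c : List Int) (m : Int) (hm : 0 ≤ m) :
    c.foldl max m = max m (pvColMax c) := by
  cases c with
  | nil => simp [pvColMax, PySem.List.max?, max_eq_left hm]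
  | cons x t =>
      show t.foldl max (max m x) = max m (pvColMax (x :: t))
      rw [foldl_max_comm, pvColMax_cons]

-- A's inner row loop, characterised
theorem inner_loop (c : List Int) : ∀ (col m : Int) (mc : Option Int),
    c.foldl (fun (st : Int × Option Int) v => if st.1 < v then (v, some col) else st) (m, mc)
      = (c.foldl max m, if m < c.foldl max m then some col else mc) := by
  induction c with
  | nil => intro col m mc; simp
  | cons v t ih =>
      intro col m mc
      by_cases h : m < v
      · show t.foldl _ (if m < v then (v, some col) else (m, mc)) = _
        rw [if_pos h, ih]
        have hv : v ≤ t.foldl max v := (PySem.List.le_foldl_max t v).1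
        have hmv : max m v = v := max_eq_right h.le
        show _ = (t.foldl max (max m v), if m < t.foldl max (max m v) then some col else mc)
        rw [hmv, if_pos (lt_of_lt_of_le h hv), ite_self]
      · show t.foldl _ (if m < v then (v, some col) else (m, mc)) = _
        rw [if_neg h, ih]
        have hmv : max m v = m := max_eq_left (not_lt.mp h)
        show _ = (t.foldl max (max m v), if m < t.foldl max (max m v) then some col else mc)
        rw [hmv]

-- A's outer column loop over an enumerated column list, characterised
theorem outer_loop (cols : List (List Int)) :
    ∀ (s m : Int) (mc : Option Int), 0 ≤ m →
    ((PySem.List.enumerate cols s).foldl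
        (fun (st : Int × Option Int) (p : Int × List Int) =>
          p.2.foldl (fun (st : Int × Option Int) v => if st.1 < v then (v, some p.1) else st) st)
        (m, mc)).2
      = (if m < cols.foldl (fun a c => max a (pvColMax c)) m
          then Option.map (fun k : Nat => s + (k : Int))
                 (PySem.List.index? (cols.map pvColMax)
                   (cols.foldl (fun a c => max a (pvColMax c)) m))
          else mc) := by
  induction cols with
  | nil => intro s m mc hm; simp
  | cons c t ih =>
      intro s m mc hm
      have hcons : PySem.List.enumerate (c :: t) s = (s, c) :: PySem.List.enumerate t (s + 1) := by
        simp [PySem.List.enumerate]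
      rw [hcons]
      show ((PySem.List.enumerate t (s+1)).foldl _
              (c.foldl (fun (st : Int × Option Int) v => if st.1 < v then (v, some s) else st) (m, mc))).2 = _
      rw [inner_loop, foldl_max_colMax c m hm]
      set m' : Int := max m (pvColMax c) with hm'
      have hm'0 : 0 ≤ m' := le_trans hm (le_max_left _ _)
      rw [ih (s+1) m' _ hm'0]
      set B : Int := t.foldl (fun a c => max a (pvColMax c)) m' with hB
      have hBcons : (c :: t).foldl (fun a c => max a (pvColMax c)) m = B := rfl
      have hm'B : m' ≤ B := (PySem.List.le_foldl_max_int t pvColMax m').1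
      rw [hBcons]
      by_cases h1 : m' < B
      · -- head column's max is strictly below the overall best
        have hmB : m < B := lt_of_le_of_lt (le_max_left _ _) h1
        have hcne : pvColMax c ≠ B := ne_of_lt (lt_of_le_of_lt (le_max_right m _) h1)
        rw [if_pos h1, if_pos hmB, List.map_cons, PySem.List.index?_cons_of_ne _ hcne,
          Option.map_map]
        congr 1
        funext k
        simp
        ring
      · -- overall best equals m', reached already at (or before) the head column
        have hBm' : B = m' := le_antisymm (not_lt.mp h1) hm'B
        rw [if_neg h1]
        by_cases h2 : m < pvColMax c
        · have hc : pvColMax c = m' := (max_eq_right h2.le).symm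
          have hmm' : m < m' := lt_of_lt_of_le h2 (le_max_right m _)
          have hmB : m < B := by rw [hBm']; exact hmm'
          rw [if_pos hmm', if_pos hmB, List.map_cons, hBm', ← hc, PySem.List.index?_cons_self]
          simp
        · have hmm' : m' = m := max_eq_left (not_lt.mp h2)
          have hnmm' : ¬ m < m' := by rw [hmm']; exact lt_irrefl m
          have hmB : ¬ m < B := by rw [hBm', hmm']; exact lt_irrefl m
          rw [if_neg hnmm', if_neg hmB]

-- B's overall best is the same running max A maintains (both floored at 0)
theorem best_eq_foldl (cols : List (List Int)) :
    max 0 ((PySem.List.max? (cols.map pvColMax) (fun y => y)).getD 0)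
      = cols.foldl (fun a c => max a (pvColMax c)) 0 := by
  cases cols with
  | nil => simp [PySem.List.max?]
  | cons c t =>
      rw [List.map_cons, PySem.List.max?_id_cons, Option.getD_some]
      show max 0 ((t.map pvColMax).foldl max (pvColMax c))
        = t.foldl (fun a c => max a (pvColMax c)) (max 0 (pvColMax c))
      rw [List.foldl_map, foldl_maxP_comm]

theorem findMaxCol_eq_alt (rating : List (List Int)) :
    findMaxCol rating = findMaxCol_alt rating := by
  unfold findMaxCol findMaxCol_alt
  have hpv : (fun col => (PySem.List.max? col (fun y => y)).getD 0) = pvColMax := rfl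
  rw [hpv]
  -- rewrite A's index loops into a fold over the enumerated list of columns
  have h1 :
      (PySem.List.pyRange 0 (rating.length : Int) 1).foldl
        (fun (st : Int × Option Int) col =>
          (PySem.List.pyRange 0 ((PySem.List.pyGetD rating col []).length : Int) 1).foldl
            (fun (st : Int × Option Int) row =>
              if st.1 < PySem.List.pyGetD (PySem.List.pyGetD rating col []) row 0
              then (PySem.List.pyGetD (PySem.List.pyGetD rating col []) row 0, some col) else st)
            st)
        ((0 : Int), (none : Option Int))
      = (PySem.List.enumerate rating 0).foldl
          (fun (st : Int × Option Int) (p : Int × List Int) =>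
            p.2.foldl (fun (st : Int × Option Int) v => if st.1 < v then (v, some p.1) else st) st)
          ((0 : Int), (none : Option Int)) := by
    rw [PySem.List.enumerate_eq_map_pyRange rating ([] : List Int), List.foldl_map]
    congr 1
    funext st col
    show (PySem.List.pyRange 0 ((PySem.List.pyGetD rating col []).length : Int) 1).foldl
        (fun (st : Int × Option Int) row =>
          if st.1 < PySem.List.pyGetD (PySem.List.pyGetD rating col []) row 0
          then (PySem.List.pyGetD (PySem.List.pyGetD rating col []) row 0, some col) else st) st
      = (PySem.List.pyGetD rating col []).foldl
          (fun (st : Int × Option Int) v => if st.1 < v then (v, some col) else st) st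
    exact PySem.List.foldl_pyRange_zero_pyGetD' (PySem.List.pyGetD rating col []) 0
        (fun (st : Int × Option Int) v => if st.1 < v then (v, some col) else st) st
  simp only []
  rw [h1, outer_loop rating 0 0 none le_rfl]
  set best : Int := (PySem.List.max? (rating.map pvColMax) (fun y => y)).getD 0 with hbest
  have h2 : rating.foldl (fun a c => max a (pvColMax c)) 0 = max 0 best :=
    (best_eq_foldl rating).symm
  rw [h2]
  by_cases h : best ≤ 0
  · rw [if_neg (by rw [max_eq_left h]; exact lt_irrefl 0), if_pos h]
  · have h0 : (0:Int) < best := not_le.mp h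
    rw [if_pos (by rw [max_eq_right h0.le]; exact h0), if_neg (not_le.mpr h0), max_eq_right h0.le]
    congr 1
    funext k
    simp

-- ===== VERDICT (by name: the statement is the Claim_ definition above) =====
theorem findMaxCol_spec : Claim_equal_findMaxCol := by
  intro rating _
  show findMaxCol rating = findMaxCol_alt rating
  exact findMaxCol_eq_alt rating
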